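-- pv_equiv track=rewrite | github.com/smeky42/adventOfCode2023 | day11/day11.py | enumerate_galaxies
-- ===== SOURCE A (Python) =====
-- def enumerate_galaxies(galaxies):
--     galaxy_count = 0
--
--     for i, line in enumerate(galaxies):
--         for j, char in enumerate(line):
--             if char == "#":
--                 galaxy_count += 1
--                 galaxies[i][j] = str(galaxy_count)
--
--     return galaxy_count, galaxies
-- ===== SOURCE B (Python) =====
-- def enumerate_galaxies(galaxies):
--     # Flatten the grid to one 1-D stream, count with .count, label in a single
--     # flat pass, then reshape back into rows using the recorded row lengths.
--     lengths = [len(row) for row in galaxies]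
--     flat = [ch for row in galaxies for ch in row]
--     total = flat.count("#")
--     labeled = []
--     k = 0
--     for ch in flat:
--         if ch == "#":
--             k += 1
--             labeled.append(str(k))
--         else:
--             labeled.append(ch)
--     pos = 0
--     for row, n in zip(galaxies, lengths):
--         row[:] = labeled[pos:pos + n]
--         pos += n
--     return total, galaxies
-- ===== Notes on version B (the rewrite author's own statement) =====
-- stated objective: alternative
-- what changed: Replaces A's nested counter-threading scan with a flatten/label/reshape pipeline: the grid is flattened to a single 1-D list, the count is taken with list.count, labels are assigned in one flat pass, and the labeled stream is cut back into rows by the recorded row lengths.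
import Mathlib
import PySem

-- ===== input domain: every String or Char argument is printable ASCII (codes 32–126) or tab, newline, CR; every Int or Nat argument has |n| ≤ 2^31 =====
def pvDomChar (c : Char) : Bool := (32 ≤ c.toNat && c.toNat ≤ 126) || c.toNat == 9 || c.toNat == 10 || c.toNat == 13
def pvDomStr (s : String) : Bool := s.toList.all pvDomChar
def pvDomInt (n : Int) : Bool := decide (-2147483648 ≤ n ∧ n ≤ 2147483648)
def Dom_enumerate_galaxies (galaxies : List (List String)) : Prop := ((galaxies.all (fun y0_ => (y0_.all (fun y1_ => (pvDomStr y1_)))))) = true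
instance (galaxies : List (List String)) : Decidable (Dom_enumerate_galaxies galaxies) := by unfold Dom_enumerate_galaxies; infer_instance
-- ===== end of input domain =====

-- B replaces A's nested counter-threading scan with a flatten/label/reshape pipeline
-- (alternative decomposition, same cost). Both Pythons mutate `galaxies` in place;
-- the equivalence proved is about the return value.

-- ===== PORT A =====
-- inner loop of A over one row: state is the running galaxy_count; "#" cells are
-- rewritten to str(count)
def pvRowA (c : Int) (row : List String) : Int × List String :=
  match row with
  | [] => (c, [])
  | ch :: rest =>
    if ch == "#" then
      let r := pvRowA (c + 1) rest
      (r.1, PySem.Int.toStr (c + 1) :: r.2)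
    else
      let r := pvRowA c rest
      (r.1, ch :: r.2)

-- outer loop of A over the rows, threading galaxy_count
def pvGoA (c : Int) (g : List (List String)) : Int × List (List String) :=
  match g with
  | [] => (c, [])
  | row :: rest =>
    let r := pvRowA c row
    let t := pvGoA r.1 rest
    (t.1, r.2 :: t.2)

def enumerate_galaxies (galaxies : List (List String)) : Int × List (List String) :=
  pvGoA 0 galaxies

-- ===== PORT B =====
-- single flat labeling pass: k counts '#' cells seen so far in the 1-D stream
def pvLabel (k : Int) (flat : List String) : List String :=
  match flat with
  | [] => []
  | ch :: rest =>
    if ch == "#" then PySem.Int.toStr (k + 1) :: pvLabel (k + 1) rest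
    else ch :: pvLabel k rest

-- reshape the labeled stream back into rows of the recorded lengths
def pvReshape (labeled : List String) (lengths : List Nat) : List (List String) :=
  match lengths with
  | [] => []
  | n :: rest => labeled.take n :: pvReshape (labeled.drop n) rest

def enumerate_galaxies_alt (galaxies : List (List String)) : Int × List (List String) :=
  let lengths := galaxies.map List.length
  let flat := galaxies.flatMap (fun r => r)
  let total : Int := (flat.count "#" : Nat)
  (total, pvReshape (pvLabel 0 flat) lengths)

-- ===== PRECONDITION & SPEC =====
def Spec_enumerate_galaxies (galaxies : List (List String)) (out : Int × List (List String)) : Prop := out = enumerate_galaxies_alt galaxies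
instance (galaxies : List (List String)) (out : Int × List (List String)) : Decidable (Spec_enumerate_galaxies galaxies out) := by unfold Spec_enumerate_galaxies; infer_instance

-- ===== CLAIM =====
def Claim_equal_enumerate_galaxies : Prop := ∀ (galaxies : List (List String)), Dom_enumerate_galaxies galaxies → Spec_enumerate_galaxies galaxies (enumerate_galaxies galaxies)

-- ===== LEMMAS AND PROOFS =====

-- A's inner row loop is the flat labeling pass restricted to that row,
-- and its final counter is the start counter plus the row's '#' count
theorem pvRowA_eq (row : List String) (c : Int) :
    pvRowA c row = (c + (row.count "#" : Nat), pvLabel c row) := by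
  induction row generalizing c with
  | nil => simp [pvRowA, pvLabel]
  | cons ch rest ih =>
    by_cases h : ch = "#"
    · subst h
      simp [pvRowA, pvLabel, ih]
      ring
    · simp [pvRowA, pvLabel, ih, h]

-- the flat labeling pass splits over append, advancing the counter by the '#' count
theorem pvLabel_append (xs ys : List String) (c : Int) :
    pvLabel c (xs ++ ys) = pvLabel c xs ++ pvLabel (c + (xs.count "#" : Nat)) ys := by
  induction xs generalizing c with
  | nil => simp [pvLabel]
  | cons ch rest ih =>
    by_cases h : ch = "#"
    · subst h
      simp [pvLabel, ih]
      congr 1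
      ring
    · simp [pvLabel, ih, h]

-- labeling preserves length
theorem pvLabel_length (xs : List String) (c : Int) :
    (pvLabel c xs).length = xs.length := by
  induction xs generalizing c with
  | nil => rfl
  | cons ch rest ih => simp only [pvLabel]; split <;> simp [ih]

-- grid-level core: A's threaded scan equals flatten-label-reshape
theorem pvGoA_eq (g : List (List String)) (c : Int) :
    pvGoA c g = (c + ((g.flatMap (fun r => r)).count "#" : Nat),
      pvReshape (pvLabel c (g.flatMap (fun r => r))) (g.map List.length)) := by
  induction g generalizing c with
  | nil => simp [pvGoA, pvReshape]
  | cons row rest ih =>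
    simp only [pvGoA, pvRowA_eq, ih, List.flatMap_cons, List.map_cons, pvReshape,
      pvLabel_append, List.count_append]
    have hl := pvLabel_length row c
    rw [Prod.mk.injEq]
    refine ⟨by push_cast; ring, ?_⟩
    rw [← hl, List.take_left, List.drop_left]

-- ===== VERDICT =====
theorem enumerate_galaxies_spec : Claim_equal_enumerate_galaxies := by
  intro galaxies _
  unfold Spec_enumerate_galaxies enumerate_galaxies enumerate_galaxies_alt
  rw [pvGoA_eq]
  simp
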